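-- pv_equiv track=rewrite | github.com/ethz-coss/fairlane | scripts/utils.py | getSplitVehiclesList
-- ===== SOURCE A (Python) =====
-- def getSplitVehiclesList(allvehicles):
--     rl_vehicleID = []
--     cav_vehicleID = []
--     heuristic_vehicleID = []
--     npc_vehicleID = []
--     for veh in allvehicles:
--         x = veh.split("_",1)
--         if x[0] =="RL":
--             rl_vehicleID.append(veh)
--         elif x[0] == "cav":
--             cav_vehicleID.append(veh)
--         elif x[0] == "heuristic":
--             heuristic_vehicleID.append(veh)
--         elif x[0] == "npc":
--             npc_vehicleID.append(veh)
--     return npc_vehicleID,rl_vehicleID,heuristic_vehicleID,cav_vehicleID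
-- ===== SOURCE B (Python) =====
-- def getSplitVehiclesList(allvehicles):
--     def prefix(veh):
--         return veh.split("_", 1)[0]
--     return ([veh for veh in allvehicles if prefix(veh) == "npc"],
--             [veh for veh in allvehicles if prefix(veh) == "RL"],
--             [veh for veh in allvehicles if prefix(veh) == "heuristic"],
--             [veh for veh in allvehicles if prefix(veh) == "cav"])
-- ===== Notes on version B (the rewrite author's own statement) =====
-- stated objective: simpler
-- what changed: Replaces the single accumulator loop with an if/elif cascade by four independent list comprehensions, one filtering scan per prefix, returned directly in (npc, rl, heuristic, cav) order.
import Mathlib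
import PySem

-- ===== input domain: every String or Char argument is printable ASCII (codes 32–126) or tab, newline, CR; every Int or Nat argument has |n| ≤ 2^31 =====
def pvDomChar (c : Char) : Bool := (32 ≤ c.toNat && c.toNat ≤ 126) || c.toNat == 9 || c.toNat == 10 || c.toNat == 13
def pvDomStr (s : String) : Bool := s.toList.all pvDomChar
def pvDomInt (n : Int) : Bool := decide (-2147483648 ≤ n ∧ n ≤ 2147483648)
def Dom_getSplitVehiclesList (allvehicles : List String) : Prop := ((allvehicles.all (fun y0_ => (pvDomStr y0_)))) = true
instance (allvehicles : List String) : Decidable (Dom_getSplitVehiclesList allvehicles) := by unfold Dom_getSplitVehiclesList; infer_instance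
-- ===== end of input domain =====

-- B replaces A's single if/elif accumulator loop by four independent filtering scans, one per prefix (simpler decomposition, same O(n) cost).

-- ===== PORT A =====
-- veh.split("_", 1)[0]; split with a nonempty separator always yields a nonempty list, so [0] never raises ([] fallback is unreachable).
def pvX0 (veh : String) : Option String :=
  PySem.List.pyGet? ((PySem.Str.splitMax? veh "_" 1).getD []) 0

def getSplitVehiclesList (allvehicles : List String) : List String × List String × List String × List String :=
  let st := allvehicles.foldl
    (fun (acc : List String × List String × List String × List String) veh =>
      let (rl, cav, heu, npc) := acc
      if pvX0 veh = some "RL" then (rl ++ [veh], cav, heu, npc)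
      else if pvX0 veh = some "cav" then (rl, cav ++ [veh], heu, npc)
      else if pvX0 veh = some "heuristic" then (rl, cav, heu ++ [veh], npc)
      else if pvX0 veh = some "npc" then (rl, cav, heu, npc ++ [veh])
      else acc)
    ([], [], [], [])
  (st.2.2.2, st.1, st.2.2.1, st.2.1)

-- ===== PORT B =====
def pvPrefix (veh : String) : Option String :=
  PySem.List.pyGet? ((PySem.Str.splitMax? veh "_" 1).getD []) 0

def getSplitVehiclesList_alt (allvehicles : List String) : List String × List String × List String × List String :=
  (allvehicles.filter (fun veh => pvPrefix veh = some "npc"),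
   allvehicles.filter (fun veh => pvPrefix veh = some "RL"),
   allvehicles.filter (fun veh => pvPrefix veh = some "heuristic"),
   allvehicles.filter (fun veh => pvPrefix veh = some "cav"))

-- ===== PRECONDITION & SPEC =====
def Spec_getSplitVehiclesList (allvehicles : List String) (out : List String × List String × List String × List String) : Prop := out = getSplitVehiclesList_alt allvehicles
instance (allvehicles : List String) (out : List String × List String × List String × List String) : Decidable (Spec_getSplitVehiclesList allvehicles out) := by unfold Spec_getSplitVehiclesList; infer_instance

-- ===== CLAIM (what is proved, stated in full; the proofs are below) =====
def Claim_equal_getSplitVehiclesList : Prop := ∀ (allvehicles : List String), Dom_getSplitVehiclesList allvehicles → Spec_getSplitVehiclesList allvehicles (getSplitVehiclesList allvehicles)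

-- ===== LEMMAS AND PROOFS =====

theorem pvX0_eq_pvPrefix (veh : String) : pvX0 veh = pvPrefix veh := rfl

theorem foldl_inv (l : List String) (rl cav heu npc : List String) :
    l.foldl
      (fun (acc : List String × List String × List String × List String) veh =>
        let (rl, cav, heu, npc) := acc
        if pvX0 veh = some "RL" then (rl ++ [veh], cav, heu, npc)
        else if pvX0 veh = some "cav" then (rl, cav ++ [veh], heu, npc)
        else if pvX0 veh = some "heuristic" then (rl, cav, heu ++ [veh], npc)
        else if pvX0 veh = some "npc" then (rl, cav, heu, npc ++ [veh])
        else acc)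
      (rl, cav, heu, npc)
    = (rl ++ l.filter (fun veh => pvPrefix veh = some "RL"),
       cav ++ l.filter (fun veh => pvPrefix veh = some "cav"),
       heu ++ l.filter (fun veh => pvPrefix veh = some "heuristic"),
       npc ++ l.filter (fun veh => pvPrefix veh = some "npc")) := by
  induction l generalizing rl cav heu npc with
  | nil => simp
  | cons v t ih =>
    simp only [List.foldl_cons, List.filter_cons]
    by_cases h1 : pvX0 v = some "RL" <;>
      by_cases h2 : pvX0 v = some "cav" <;>
        by_cases h3 : pvX0 v = some "heuristic" <;>
          by_cases h4 : pvX0 v = some "npc" <;>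
            simp_all [pvX0_eq_pvPrefix, ih]

-- ===== VERDICT (by name: the statement is the Claim_ definition above) =====
theorem getSplitVehiclesList_spec : Claim_equal_getSplitVehiclesList := by
  intro l _
  unfold Spec_getSplitVehiclesList getSplitVehiclesList getSplitVehiclesList_alt
  simp only [foldl_inv]
  simp
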